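-- pv_equiv track=rewrite | github.com/treewithsouls/Development-of-professional-applications | lab1.py | remove_short_even_chains
-- ===== SOURCE A (Python) =====
-- def remove_short_even_chains(arr):
--     result = []  # Итоговый список, который будет содержать нужные элементы
--     temp_chain = []  # Временный список для хранения цепочек чётных чисел
--
--     for num in arr:
--         if num % 2 == 0:  # Проверяем, является ли число чётным
--             temp_chain.append(num)  # Добавляем чётное число в временную цепочку
--         else:
--             if len(temp_chain) >= 3:  # Если длина временной цепочки >= 3
--                 result.extend(temp_chain)  # Добавляем цепочку в итоговый список
--             temp_chain = []  # Сбрасываем временную цепочку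
--             result.append(num)  # Добавляем нечётное число в итоговый список
--
--     if len(temp_chain) >= 3:  # Проверяем последнюю цепочку на минимальную длину
--         result.extend(temp_chain)  # Добавляем цепочку в итоговый список
--
--     return result  # Возвращаем итоговый список
-- ===== SOURCE B (Python) =====
-- def remove_short_even_chains(arr):
--     groups = []
--     for num in arr:
--         if groups and (groups[-1][0] % 2 == 0) == (num % 2 == 0):
--             groups[-1].append(num)
--         else:
--             groups.append([num])
--     return [x for g in groups if g[0] % 2 != 0 or len(g) >= 3 for x in g]
-- ===== Notes on version B (the rewrite author's own statement) =====
-- stated objective: idiomatic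
-- what changed: Replaced the manual chain-accumulate-and-flush state machine with a group-then-filter pipeline: first split the input into maximal runs of equal parity, then keep odd runs unconditionally and even runs of length >= 3.
import Mathlib
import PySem

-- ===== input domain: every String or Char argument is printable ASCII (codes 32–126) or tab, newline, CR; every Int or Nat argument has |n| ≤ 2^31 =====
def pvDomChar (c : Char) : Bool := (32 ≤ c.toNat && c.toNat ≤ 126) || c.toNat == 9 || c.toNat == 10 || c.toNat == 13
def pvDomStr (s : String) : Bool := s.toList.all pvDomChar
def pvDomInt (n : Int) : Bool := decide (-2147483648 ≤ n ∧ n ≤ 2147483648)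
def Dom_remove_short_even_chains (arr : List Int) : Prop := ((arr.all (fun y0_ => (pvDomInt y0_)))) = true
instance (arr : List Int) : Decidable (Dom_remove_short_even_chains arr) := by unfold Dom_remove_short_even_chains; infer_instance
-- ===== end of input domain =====

-- B replaces A's chain-accumulate-and-flush state machine with a group-by-parity-then-filter pipeline (same cost, more idiomatic).


-- ===== PORT A =====
-- one loop iteration of A: state = (result, temp_chain)
def pvStepA (st : List Int × List Int) (num : Int) : List Int × List Int :=
  if PySem.Int.mod num 2 = 0 then (st.1, st.2 ++ [num])
  else ((if 3 ≤ st.2.length then st.1 ++ st.2 else st.1) ++ [num], [])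

def remove_short_even_chains (arr : List Int) : List Int :=
  let st := arr.foldl pvStepA ([], [])
  if 3 ≤ st.2.length then st.1 ++ st.2 else st.1

-- ===== PORT B =====
-- one loop iteration of B: append num to the last run if it has the same parity, else start a new run
def pvAddB (gs : List (List Int)) (num : Int) : List (List Int) :=
  match gs.getLast? with
  | some g =>
      if (decide (PySem.Int.mod g.headI 2 = 0) == decide (PySem.Int.mod num 2 = 0)) then
        gs.dropLast ++ [g ++ [num]]
      else gs ++ [[num]]
  | none => [[num]]

-- the comprehension's filter: keep odd runs, and even runs of length ≥ 3
def pvKeep (g : List Int) : List Int :=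
  if ¬ PySem.Int.mod g.headI 2 = 0 ∨ 3 ≤ g.length then g else []

def remove_short_even_chains_alt (arr : List Int) : List Int :=
  (arr.foldl pvAddB []).flatMap pvKeep

-- ===== PRECONDITION & SPEC =====
def Spec_remove_short_even_chains (arr : List Int) (out : List Int) : Prop := out = remove_short_even_chains_alt arr
instance (arr : List Int) (out : List Int) : Decidable (Spec_remove_short_even_chains arr out) := by unfold Spec_remove_short_even_chains; infer_instance

-- ===== CLAIM (what is proved, stated in full; the proofs are below) =====
def Claim_equal_remove_short_even_chains : Prop := ∀ (arr : List Int), Dom_remove_short_even_chains arr → Spec_remove_short_even_chains arr (remove_short_even_chains arr)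

-- ===== LEMMAS AND PROOFS =====

-- the groups list ends (if nonempty) with a nonempty group of odd head
def pvOddTail (gs : List (List Int)) : Prop :=
  gs = [] ∨ ∃ gs' g, gs = gs' ++ [g] ∧ g.headI % 2 = 1 ∧ g ≠ []

-- invariant tying A's (result, temp_chain) to B's groups built so far
def pvInv (st : List Int × List Int) (gs : List (List Int)) : Prop :=
  (st.2 = [] ∧ st.1 = gs.flatMap pvKeep ∧ pvOddTail gs)
  ∨ (st.2 ≠ [] ∧ (2 : Int) ∣ st.2.headI ∧
      ∃ gs', gs = gs' ++ [st.2] ∧ st.1 = gs'.flatMap pvKeep ∧ pvOddTail gs')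

lemma pvHeadI_append {g : List Int} (l : List Int) (h : g ≠ []) : (g ++ l).headI = g.headI := by
  cases g with
  | nil => exact absurd rfl h
  | cons a t => rfl

lemma pvInv_step (st : List Int × List Int) (gs : List (List Int)) (num : Int)
    (h : pvInv st gs) : pvInv (pvStepA st num) (pvAddB gs num) := by
  by_cases he : (2 : Int) ∣ num
  · -- num even
    rcases h with ⟨h2, h1, hg⟩ | ⟨h2, hhead, gs', hgs, h1, hg⟩
    · -- temp empty: new run [num]
      rcases hg with rfl | ⟨gs', g, rfl, hodd, hne⟩
      · refine Or.inr ⟨?_, ?_, [], ?_, ?_, Or.inl rfl⟩ <;>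
          simp_all [pvStepA, pvAddB]
      · refine Or.inr ⟨?_, ?_, gs' ++ [g], ?_, ?_, Or.inr ⟨gs', g, rfl, hodd, hne⟩⟩ <;>
          simp_all [pvStepA, pvAddB]
    · -- temp nonempty, even head: merge num into the last run
      refine Or.inr ⟨?_, ?_, gs', ?_, ?_, hg⟩ <;>
        simp_all [pvStepA, pvAddB, pvHeadI_append (g := st.2) [num] h2]
  · -- num odd
    have he1 : num % 2 = 1 := by omega
    rcases h with ⟨h2, h1, hg⟩ | ⟨h2, hhead, gs', hgs, h1, hg⟩
    · rcases hg with rfl | ⟨gs', g, rfl, hodd, hne⟩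
      · -- no groups yet: start the run [num]; A appends num to result
        refine Or.inl ⟨?_, ?_, Or.inr ⟨[], [num], ?_, ?_, by simp⟩⟩ <;>
          simp_all [pvStepA, pvAddB, pvKeep]
      · -- last run odd: B merges num into it; A appends num
        refine Or.inl ⟨?_, ?_, Or.inr ⟨gs', g ++ [num], ?_, ?_, by simp⟩⟩ <;>
          simp_all [pvStepA, pvAddB, pvKeep, pvHeadI_append (g := g) [num] hne]
    · -- temp nonempty even run ends: B starts new run [num]; A flushes temp (kept iff len ≥ 3)
      have hk : pvKeep st.2 = if 3 ≤ st.2.length then st.2 else [] := by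
        have : ¬ st.2.headI % 2 = 1 := by omega
        simp [pvKeep, this]
      refine Or.inl ⟨?_, ?_, Or.inr ⟨gs' ++ [st.2], [num], ?_, ?_, by simp⟩⟩ <;>
        simp_all [pvStepA, pvAddB] <;> (try split_ifs) <;> simp_all [pvKeep, he1]

lemma pvInv_foldl (arr : List Int) : ∀ (st : List Int × List Int) (gs : List (List Int)),
    pvInv st gs → pvInv (arr.foldl pvStepA st) (arr.foldl pvAddB gs) := by
  induction arr with
  | nil => intro st gs h; exact h
  | cons a t ih => intro st gs h; exact ih _ _ (pvInv_step st gs a h)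

-- ===== VERDICT (by name: the statement is the Claim_ definition above) =====
theorem remove_short_even_chains_spec : Claim_equal_remove_short_even_chains := by
  intro arr _
  unfold Spec_remove_short_even_chains remove_short_even_chains remove_short_even_chains_alt
  have h := pvInv_foldl arr ([], []) [] (Or.inl ⟨rfl, by simp, Or.inl rfl⟩)
  rcases h with ⟨h2, h1, _⟩ | ⟨h2, hhead, gs', hgs, h1, _⟩
  · simp [h2, h1]
  · have hne : ¬ (List.foldl pvStepA ([], []) arr).2.headI % 2 = 1 := by omega
    have hk : pvKeep (List.foldl pvStepA ([], []) arr).2 =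
        if 3 ≤ (List.foldl pvStepA ([], []) arr).2.length then (List.foldl pvStepA ([], []) arr).2
        else [] := by simp [pvKeep, hne]
    simp only [hgs, h1, List.flatMap_append, List.flatMap_cons, List.flatMap_nil, hk,
      List.append_nil]
    split_ifs <;> simp
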